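-- pv_equiv track=rewrite | github.com/miicck/einsumpy | latex_tools.py | split_terms
-- ===== SOURCE A (Python) =====
-- from typing import Iterable, Tuple
--
-- def standardize(latex: str) -> str:
--     return make_subscripts_explicit(remove_unnecessary_whitespace(latex))
--
-- def make_subscripts_explicit(latex: str):
--     for i in range(len(latex) - 2, -1, -1):
--         if latex[i] == "_" and latex[i + 1] != "{":
--             latex = latex[:i + 1] + "{" + latex[i + 1] + "}" + latex[i + 2:]
--     return latex
--
-- def remove_unnecessary_whitespace(latex: str) -> str:
--     result = ""
--     allow = False
--     for c in latex:
--         if c == "\\":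
--             allow = True
--         elif c == "_":
--             allow = False
--         elif c == " ":
--             if not allow:
--                 continue
--             allow = False
--         result += c
--     return result
--
-- def split_terms(latex: str) -> Iterable[str]:
--     latex = standardize(latex)
--
--     def remove_first_plus(term):
--         if remove_first_plus.first:
--             remove_first_plus.first = False
--             if term[0] == "+":
--                 return term[1:]
--         return term
--
--     remove_first_plus.first = True
--
--     i_start = 0
--     for i in range(len(latex)):
--         if latex[i] in {"-", "+"} and (i == 0 or latex[i - 1] != "("):
--             if i > i_start:
--                 yield remove_first_plus(latex[i_start:i])
--             i_start = i
--
--     yield remove_first_plus(latex[i_start:])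
-- ===== SOURCE B (Python) =====
-- def remove_unnecessary_whitespace(latex: str) -> str:
--     result = ""
--     allow = False
--     for c in latex:
--         if c == "\\":
--             allow = True
--         elif c == "_":
--             allow = False
--         elif c == " ":
--             if not allow:
--                 continue
--             allow = False
--         result += c
--     return result
--
--
-- def make_subscripts_explicit(latex: str):
--     for i in range(len(latex) - 2, -1, -1):
--         if latex[i] == "_" and latex[i + 1] != "{":
--             latex = latex[:i + 1] + "{" + latex[i + 1] + "}" + latex[i + 2:]
--     return latex
--
--
-- def standardize(latex: str) -> str:
--     return make_subscripts_explicit(remove_unnecessary_whitespace(latex))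
--
--
-- def split_terms(latex: str):
--     # Streaming character automaton: build term buffers directly, tracking only
--     # the previous character; no index arithmetic or slicing of the input.
--     latex = standardize(latex)
--     terms = []
--     cur = []
--     prev = ""
--     for c in latex:
--         if c in "+-" and cur and prev != "(":
--             terms.append("".join(cur))
--             cur = [c]
--         else:
--             cur.append(c)
--         prev = c
--     terms.append("".join(cur))
--     if terms[0][:1] == "+":
--         terms[0] = terms[0][1:]
--     return terms
-- ===== Notes on version B (the rewrite author's own statement) =====
-- stated objective: alternative
-- what changed: B replaces A's index-based generator (mutable slice-start i_start, lookback latex[i-1], first-yield flag, slicing terms out of the string) by a streaming character automaton that never indexes the string: it folds over the characters accumulating the current term buffer and the list of finished terms, tracking only the previous character, and strips the leading '+' from the first term once at the end.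
-- outside the precondition, e.g. on split_terms(''): A raises IndexError, B returns ['']; on split_terms('   '): A raises IndexError, B returns ['']
import Mathlib
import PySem

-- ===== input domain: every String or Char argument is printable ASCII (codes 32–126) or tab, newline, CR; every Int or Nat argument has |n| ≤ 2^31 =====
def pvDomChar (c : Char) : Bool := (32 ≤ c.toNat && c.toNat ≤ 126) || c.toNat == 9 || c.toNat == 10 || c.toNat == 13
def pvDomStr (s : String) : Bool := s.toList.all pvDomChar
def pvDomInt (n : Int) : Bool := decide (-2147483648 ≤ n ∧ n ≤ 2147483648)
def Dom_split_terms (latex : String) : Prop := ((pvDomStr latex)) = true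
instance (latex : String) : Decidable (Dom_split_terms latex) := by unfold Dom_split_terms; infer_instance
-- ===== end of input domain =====

-- B replaces A's index-slicing generator by a streaming character automaton building term
-- buffers with the previous character tracked in state; objective: alternative (same O(n)).

-- ===== PORT A =====
-- module helper remove_unnecessary_whitespace (shared context of both Pythons)
def removeWS (latex : List Char) : List Char :=
  (latex.foldl
    (fun (st : List Char × Bool) c =>
      if c == '\\' then (st.1 ++ [c], true)
      else if c == '_' then (st.1 ++ [c], false)
      else if c == ' ' then (if !st.2 then st else (st.1 ++ [c], false))
      else (st.1 ++ [c], st.2))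
    ([], false)).1

-- module helper make_subscripts_explicit: the loop i = len-2, len-3, …, 0 over the evolving string
def mseGo : List Char → Nat → List Char
  | l, 0 => l
  | l, i + 1 =>
    mseGo
      (if l.getD i ' ' == '_' && !(l.getD (i + 1) ' ' == '{') then
        l.take (i + 1) ++ ['{', l.getD (i + 1) ' ', '}'] ++ l.drop (i + 2)
      else l) i

-- module helper standardize
def standardize (l : List Char) : List Char :=
  let r := removeWS l
  mseGo r (r.length - 1)

-- A's remove_first_plus: returns (new first-flag, term).  Python indexes term[0], which
-- raises IndexError on an empty term; Pre_ excludes the inputs reaching that, so the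
-- headD placeholder is never the decisive case on admitted inputs.
def rfpA (first : Bool) (term : List Char) : Bool × List Char :=
  if first then
    (false, if term.headD ' ' == '+' then term.drop 1 else term)
  else (first, term)

-- A's loop body: state (i_start, first, yielded terms)
def stepA (s : List Char) (st : Nat × Bool × List (List Char)) (i : Nat) :
    Nat × Bool × List (List Char) :=
  if (s.getD i ' ' == '-' || s.getD i ' ' == '+') && (decide (i = 0) || !(s.getD (i - 1) ' ' == '(')) then
    if st.1 < i then
      let r := rfpA st.2.1 ((s.drop st.1).take (i - st.1))
      (i, r.1, st.2.2 ++ [r.2])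
    else (i, st.2.1, st.2.2)
  else st

def split_terms (latex : String) : List String :=
  let s := standardize latex.toList
  let fin := (List.range s.length).foldl (stepA s) (0, true, [])
  (fin.2.2 ++ [(rfpA fin.2.1 (s.drop fin.1)).2]).map String.mk

-- ===== PORT B =====
-- B's loop body: state (finished terms, current buffer, previous char; Python prev = "" ↦ none)
def stepB (st : List (List Char) × List Char × Option Char) (c : Char) :
    List (List Char) × List Char × Option Char :=
  if (c == '+' || c == '-') && !st.2.1.isEmpty && !(st.2.2 == some '(') then
    (st.1 ++ [st.2.1], [c], some c)
  else (st.1, st.2.1 ++ [c], some c)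

def split_terms_alt (latex : String) : List String :=
  let s := standardize latex.toList
  let fin := s.foldl stepB ([], [], none)
  match fin.1 ++ [fin.2.1] with
  | [] => []
  | t :: rest => ((if t.headD ' ' == '+' then t.drop 1 else t) :: rest).map String.mk

-- ===== PRECONDITION & SPEC =====
-- Pre_ excludes exactly the strings with no non-space character (standardize maps them to "",
-- on which Python A raises IndexError at term[0]).
def Pre_split_terms (latex : String) : Prop :=
  latex.toList.any (fun c => !(c == ' ')) = true
instance (latex : String) : Decidable (Pre_split_terms latex) := by
  unfold Pre_split_terms; infer_instance
def pvWitness_split_terms : String := "a+b"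

def Spec_split_terms (latex : String) (out : List String) : Prop := out = split_terms_alt latex
instance (latex : String) (out : List String) : Decidable (Spec_split_terms latex out) := by
  unfold Spec_split_terms; infer_instance

-- ===== CLAIM (what is proved, stated in full; the proofs are below) =====
def Claim_equal_split_terms : Prop :=
  ∀ (latex : String), Dom_split_terms latex → Pre_split_terms latex →
    Spec_split_terms latex (split_terms latex)

-- ===== LEMMAS AND PROOFS =====

def strip1 (t : List Char) : List Char := if t.headD ' ' == '+' then t.drop 1 else t

def stripHead : List (List Char) → List (List Char)
  | [] => []
  | t :: r => strip1 t :: r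

theorem stripHead_snoc (l : List (List Char)) (t : List Char) (h : l ≠ []) :
    stripHead (l ++ [t]) = stripHead l ++ [t] := by
  cases l with
  | nil => exact absurd rfl h
  | cons a r => simp [stripHead]

-- local slice lemmas used by the invariant
theorem slice_snoc (s : List Char) (i m : Nat) (h1 : i ≤ m) (h2 : m < s.length) :
    (s.drop i).take (m - i) ++ [s.getD m ' '] = (s.drop i).take (m + 1 - i) := by
  rw [List.getD_eq_getElem s ' ' h2]
  have he : m + 1 - i = (m - i) + 1 := by omega
  rw [he, ← List.take_concat_get' (l := s.drop i) (i := m - i) (by rw [List.length_drop]; omega)]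
  congr 1
  rw [List.getElem_drop]
  congr 1
  simp [Nat.add_sub_cancel' h1]

theorem slice_one (s : List Char) (m : Nat) (h : m < s.length) :
    [s.getD m ' '] = (s.drop m).take 1 := by
  have := slice_snoc s m m (le_refl m) h
  simpa using this

-- step-evaluation lemmas
theorem stepA_skip (s : List Char) (st : Nat × Bool × List (List Char)) (i : Nat)
    (hc : ((s.getD i ' ' == '-' || s.getD i ' ' == '+') &&
      (decide (i = 0) || !(s.getD (i - 1) ' ' == '('))) = false) :
    stepA s st i = st := by
  unfold stepA; rw [hc]; simp

theorem stepA_yield (s : List Char) (st : Nat × Bool × List (List Char)) (i : Nat)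
    (hc : ((s.getD i ' ' == '-' || s.getD i ' ' == '+') &&
      (decide (i = 0) || !(s.getD (i - 1) ' ' == '('))) = true)
    (hlt : st.1 < i) :
    stepA s st i = (i, (rfpA st.2.1 ((s.drop st.1).take (i - st.1))).1,
      st.2.2 ++ [(rfpA st.2.1 ((s.drop st.1).take (i - st.1))).2]) := by
  unfold stepA; rw [hc]; simp [hlt]

theorem stepA_zero (s : List Char) : stepA s (0, true, []) 0 = (0, true, []) := by
  unfold stepA
  split_ifs with hc hl
  · exact absurd hl (by simp)
  · rfl
  · rfl

theorem stepB_skip (st : List (List Char) × List Char × Option Char) (c : Char)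
    (hc : ((c == '+' || c == '-') && !st.2.1.isEmpty && !(st.2.2 == some '(')) = false) :
    stepB st c = (st.1, st.2.1 ++ [c], some c) := by
  unfold stepB; rw [hc]; simp

theorem stepB_flush (st : List (List Char) × List Char × Option Char) (c : Char)
    (hc : ((c == '+' || c == '-') && !st.2.1.isEmpty && !(st.2.2 == some '(')) = true) :
    stepB st c = (st.1 ++ [st.2.1], [c], some c) := by
  unfold stepB; rw [hc]; simp

-- the joint invariant: after m characters, A's fold state is determined by B's fold state
theorem inv (s : List Char) (m : Nat) (hm : m ≤ s.length) :
    ((List.range m).foldl (stepA s) (0, true, [])).2.2 =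
      stripHead ((s.take m).foldl stepB ([], [], none)).1 ∧
    ((List.range m).foldl (stepA s) (0, true, [])).2.1 =
      ((s.take m).foldl stepB ([], [], none)).1.isEmpty ∧
    ((s.take m).foldl stepB ([], [], none)).2.1 =
      (s.drop ((List.range m).foldl (stepA s) (0, true, [])).1).take
        (m - ((List.range m).foldl (stepA s) (0, true, [])).1) ∧
    ((List.range m).foldl (stepA s) (0, true, [])).1 ≤ m ∧
    (m ≠ 0 → ((List.range m).foldl (stepA s) (0, true, [])).1 < m ∧
      ((s.take m).foldl stepB ([], [], none)).2.2 = some (s.getD (m - 1) ' ')) ∧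
    (m = 0 → ((s.take m).foldl stepB ([], [], none)).2.2 = none) := by
  induction m with
  | zero => simp [stripHead]
  | succ m ih =>
    have hm' : m ≤ s.length := Nat.le_of_succ_le hm
    obtain ⟨h1, h2, h3, h4, h5, h6⟩ := ih hm'
    have hms : m < s.length := hm
    have htake : s.take (m + 1) = s.take m ++ [s.getD m ' '] := by
      rw [List.getD_eq_getElem s ' ' hms, ← List.take_concat_get']
    rw [List.range_succ, List.foldl_append, List.foldl_cons, List.foldl_nil,
      htake, List.foldl_append, List.foldl_cons, List.foldl_nil]
    generalize hA : (List.range m).foldl (stepA s) (0, true, []) = a at *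
    generalize hB : (s.take m).foldl stepB ([], [], none) = b at *
    by_cases hz : m = 0
    · subst hz
      simp only [List.range_zero, List.foldl_nil] at hA
      simp only [List.take_zero, List.foldl_nil] at hB
      rw [← hA, ← hB, stepA_zero, stepB_skip _ _ (by simp)]
      refine ⟨by simp [stripHead], by simp, ?_, by simp, fun _ => ⟨by simp, rfl⟩,
        fun hc => absurd hc one_ne_zero⟩
      simpa using slice_one s 0 hms
    · obtain ⟨hlt, hprev⟩ := h5 hz
      have hcurlen : b.2.1.length = m - a.1 := by
        rw [h3, List.length_take, List.length_drop]; omega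
      have hcurne : b.2.1.isEmpty = false := by
        cases hbc : b.2.1 with
        | nil => rw [hbc] at hcurlen; simp at hcurlen; omega
        | cons x xs => simp
      by_cases hsign : (s.getD m ' ' == '-' || s.getD m ' ' == '+') = true
      · by_cases hpar : (s.getD (m - 1) ' ' == '(') = true
        · -- sign preceded by '(' : neither side splits
          have hcp : s.getD (m - 1) ' ' = '(' := by simpa using hpar
          have hAc : ((s.getD m ' ' == '-' || s.getD m ' ' == '+') &&
              (decide (m = 0) || !(s.getD (m - 1) ' ' == '('))) = false := by
            rw [hpar]; simp [hz]
          have hBc : ((s.getD m ' ' == '+' || s.getD m ' ' == '-') && !b.2.1.isEmpty &&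
              !(b.2.2 == some '(')) = false := by
            rw [hprev, hcp]; simp
          rw [stepA_skip s a m hAc, stepB_skip b _ hBc]
          refine ⟨h1, h2, ?_, Nat.le_succ_of_le h4, fun _ => ⟨Nat.lt_succ_of_lt hlt, rfl⟩,
            fun hc => absurd hc (Nat.succ_ne_zero m)⟩
          rw [h3]
          exact slice_snoc s a.1 m (Nat.le_of_lt hlt) hms
        · -- a real boundary: A yields, B flushes
          have hpf : (s.getD (m - 1) ' ' == '(') = false := by simpa using hpar
          have hAc : ((s.getD m ' ' == '-' || s.getD m ' ' == '+') &&
              (decide (m = 0) || !(s.getD (m - 1) ' ' == '('))) = true := by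
            rw [hsign, hpf]; simp
          have hBc : ((s.getD m ' ' == '+' || s.getD m ' ' == '-') && !b.2.1.isEmpty &&
              !(b.2.2 == some '(')) = true := by
            rw [hprev, hcurne]
            generalize s.getD m ' ' = cm at hsign ⊢
            generalize s.getD (m - 1) ' ' = cp at hpf ⊢
            rcases Bool.or_eq_true_iff.mp hsign with h | h <;> simp [h, hpf]
          rw [stepA_yield s a m hAc hlt, stepB_flush b _ hBc]
          have hyield : (s.drop a.1).take (m - a.1) = b.2.1 := h3.symm
          refine ⟨?_, ?_, ?_, Nat.le_of_lt (Nat.lt_succ_self m),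
            fun _ => ⟨Nat.lt_succ_self m, rfl⟩, fun hc => absurd hc (Nat.succ_ne_zero m)⟩
          · -- yielded terms line up
            rw [hyield, h1, h2]
            cases hbt : b.1 with
            | nil => simp [rfpA, stripHead, strip1]
            | cons x r =>
              rw [stripHead_snoc _ _ (by simp)]
              simp [rfpA, stripHead]
          · rw [h2]
            cases hbt : b.1 <;> simp [rfpA]
          · have h1m : m + 1 - m = 1 := by omega
            rw [h1m]
            exact slice_one s m hms
      · -- not a sign: neither side splits
        have hsf : (s.getD m ' ' == '-' || s.getD m ' ' == '+') = false := by
          simpa using hsign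
        have hsf' : (s.getD m ' ' == '+' || s.getD m ' ' == '-') = false := by
          rw [Bool.or_comm]; exact hsf
        have hAc : ((s.getD m ' ' == '-' || s.getD m ' ' == '+') &&
            (decide (m = 0) || !(s.getD (m - 1) ' ' == '('))) = false := by
          rw [hsf]; simp
        have hBc : ((s.getD m ' ' == '+' || s.getD m ' ' == '-') && !b.2.1.isEmpty &&
            !(b.2.2 == some '(')) = false := by
          rw [hsf']; simp
        rw [stepA_skip s a m hAc, stepB_skip b _ hBc]
        refine ⟨h1, h2, ?_, Nat.le_succ_of_le h4, fun _ => ⟨Nat.lt_succ_of_lt hlt, rfl⟩,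
          fun hc => absurd hc (Nat.succ_ne_zero m)⟩
        rw [h3]
        exact slice_snoc s a.1 m (Nat.le_of_lt hlt) hms

theorem ports_agree (latex : String) : split_terms latex = split_terms_alt latex := by
  unfold split_terms split_terms_alt
  generalize standardize latex.toList = s
  simp only
  obtain ⟨h1, h2, h3, h4, h5, h6⟩ := inv s s.length (le_refl _)
  rw [List.take_length] at h2 h3 h5 h6
  rw [List.take_length] at h1
  set a := (List.range s.length).foldl (stepA s) (0, true, []) with ha
  set b := s.foldl stepB ([], [], none) with hb
  have hfinal : s.drop a.1 = b.2.1 := by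
    rw [h3, List.take_of_length_le]
    rw [List.length_drop]
  rw [h1, h2, ← hfinal]
  cases hbt : b.1 with
  | nil => simp [rfpA, stripHead, strip1]
  | cons x r => simp [rfpA, stripHead, strip1]

-- ===== VERDICT (by name: the statement is the Claim_ definition above) =====
theorem split_terms_spec : Claim_equal_split_terms := by
  intro latex _ _
  unfold Spec_split_terms
  exact ports_agree latex
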